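-- pv_equiv track=rewrite | github.com/zengyuhuei/three_stage_ASR | ppg2se/bert_data_utils.py | compose_sentences
-- ===== SOURCE A (Python) =====
-- from copy import deepcopy
--
-- TOKEN_LIMIT = 510
--
-- def compose_sentences(sentences:list):
--     composed_sentences = []
--     for sentence_start_idx in range(len(sentences)):
--         composed_sentence = []
--         for sentence_end_idx in range(sentence_start_idx, len(sentences)):
--             composed_sentence.extend(sentences[sentence_end_idx])
--             # terminate when composed sentences is longer than max token length(512 - 2)
--             if len(composed_sentence) > TOKEN_LIMIT:
--                 break
--             else:
--                 composed_sentences.append(deepcopy(composed_sentence))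
--     return composed_sentences
-- ===== SOURCE B (Python) =====
-- TOKEN_LIMIT = 510
--
-- def compose_sentences(sentences: list):
--     n = len(sentences)
--     # prefix[m] = total token count of the first m sentences
--     prefix = [0]
--     for s in sentences:
--         prefix.append(prefix[-1] + len(s))
--     out = []
--     for start in range(n):
--         limit = prefix[start] + TOKEN_LIMIT
--         # binary search: first index lo in [start, n] with prefix[lo+1] > limit
--         lo, hi = start, n
--         while lo < hi:
--             mid = (lo + hi) // 2
--             if prefix[mid + 1] <= limit:
--                 lo = mid + 1
--             else:
--                 hi = mid
--         acc = []
--         for end in range(start, lo):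
--             acc = acc + sentences[end]
--             out.append(acc)
--     return out
-- ===== Notes on version B (the rewrite author's own statement) =====
-- stated objective: alternative
-- what changed: B precomputes a prefix-sum table of sentence token counts and binary-searches, per start index, the largest window end fitting TOKEN_LIMIT, then materialises the windows, replacing A's inline extend-then-check-then-break loop.
import Mathlib
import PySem

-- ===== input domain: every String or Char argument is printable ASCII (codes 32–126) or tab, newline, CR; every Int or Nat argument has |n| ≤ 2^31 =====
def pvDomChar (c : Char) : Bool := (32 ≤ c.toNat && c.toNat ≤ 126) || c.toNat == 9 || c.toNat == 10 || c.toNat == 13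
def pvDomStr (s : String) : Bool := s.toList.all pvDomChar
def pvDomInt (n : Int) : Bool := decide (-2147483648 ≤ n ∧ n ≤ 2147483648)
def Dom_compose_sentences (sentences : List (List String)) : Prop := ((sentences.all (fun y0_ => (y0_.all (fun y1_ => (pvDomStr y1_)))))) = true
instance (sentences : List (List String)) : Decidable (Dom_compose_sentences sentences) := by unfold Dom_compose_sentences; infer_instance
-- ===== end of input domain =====

-- B replaces A's extend-then-check-then-break inner loop by a prefix-sum table and a
-- binary search for each start's largest admissible window end (alternative decomposition,
-- same asymptotic cost; equivalence of RETURN values is proved below).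

-- ===== PORT A =====
-- inner loop of A: extend composed by each following sentence, break past TOKEN_LIMIT
def pvInnerA (rest : List (List String)) (composed : List String) (out : List (List String)) :
    List (List String) :=
  match rest with
  | [] => out
  | s :: t =>
    let c := composed ++ s
    if c.length > 510 then out
    else pvInnerA t c (out ++ [c])

-- outer loop of A over start indices = over tails of the list
def pvOuterA : List (List String) → List (List String) → List (List String)
  | [], out => out
  | s :: t, out => pvOuterA t (pvInnerA (s :: t) [] out)

def compose_sentences (sentences : List (List String)) : List (List String) :=
  pvOuterA sentences []

-- ===== PORT B =====
-- prefix[m] = token count of the first m sentences (Source B's first loop)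
def pvPrefixB (sentences : List (List String)) : List Int :=
  sentences.foldl (fun p s => p ++ [(p.getLast?.getD 0) + (s.length : Int)]) [0]

-- Source B's while-loop binary search: first lo in [start, n] with prefix[lo+1] > limit
def pvBSearchB (pre : List Int) (limit : Int) (lo hi : Nat) : Nat :=
  if _h : lo < hi then
    let mid := (lo + hi) / 2
    if pre.getD (mid + 1) 0 ≤ limit then pvBSearchB pre limit (mid + 1) hi
    else pvBSearchB pre limit lo mid
  else lo
termination_by hi - lo
decreasing_by
  · have : (lo + hi) / 2 < hi := Nat.div_lt_of_lt_mul (by omega)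
    omega
  · have : lo ≤ (lo + hi) / 2 := (Nat.le_div_iff_mul_le (by omega)).mpr (by omega)
    omega

-- Source B's emission loop: acc = acc + sentences[end]; out.append(acc)
def pvEmitB (sentences : List (List String)) (start bound : Nat) (out : List (List String)) :
    List (List String) :=
  ((List.range' start (bound - start)).foldl
    (fun (st : List String × List (List String)) e =>
      let a := st.1 ++ sentences.getD e []
      (a, st.2 ++ [a]))
    ([], out)).2

def compose_sentences_alt (sentences : List (List String)) : List (List String) :=
  let pre := pvPrefixB sentences
  let n := sentences.length
  (List.range n).foldl
    (fun out start =>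
      let limit := pre.getD start 0 + 510
      let bound := pvBSearchB pre limit start n
      pvEmitB sentences start bound out)
    []

-- ===== PRECONDITION & SPEC =====
def Spec_compose_sentences (sentences : List (List String)) (out : List (List String)) : Prop := out = compose_sentences_alt sentences
instance (sentences : List (List String)) (out : List (List String)) : Decidable (Spec_compose_sentences sentences out) := by unfold Spec_compose_sentences; infer_instance

-- ===== CLAIM (what is proved, stated in full; the proofs are below) =====
def Claim_equal_compose_sentences : Prop := ∀ (sentences : List (List String)), Dom_compose_sentences sentences → Spec_compose_sentences sentences (compose_sentences sentences)

-- ===== LEMMAS AND PROOFS =====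

-- token count of the first m sentences, as Int
def pvS (s : List (List String)) (m : Nat) : Int :=
  (((s.take m).map (fun x => (x.length : Int)))).sum

theorem pvS_mono (s : List (List String)) {i j : Nat} (h : i ≤ j) : pvS s i ≤ pvS s j := by
  unfold pvS
  have : s.take j = s.take i ++ (s.drop i).take (j - i) := by
    rw [← List.take_add]; congr 1; omega
  rw [this, List.map_append, List.sum_append]
  have : 0 ≤ (((s.drop i).take (j - i)).map (fun x => (x.length : Int))).sum := by
    apply List.sum_nonneg
    intro x hx
    simp only [List.mem_map] at hx
    obtain ⟨y, _, rfl⟩ := hx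
    positivity
  omega

theorem pvS_succ (s : List (List String)) {e : Nat} (h : e < s.length) :
    pvS s (e + 1) = pvS s e + (s[e].length : Int) := by
  unfold pvS
  simp only [List.map_take]
  rw [List.sum_take_succ _ e (by simpa using h)]
  simp

-- characterisation of the prefix table
-- running totals of the prefix loop
def pvPartials (c : Int) : List (List String) → List Int
  | [] => []
  | x :: t => (c + (x.length : Int)) :: pvPartials (c + (x.length : Int)) t

theorem pvPrefixB_eq_partials :
    ∀ (s : List (List String)) (acc : List Int) (c : Int), acc.getLast? = some c →
      s.foldl (fun p x => p ++ [(p.getLast?.getD 0) + (x.length : Int)]) acc =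
        acc ++ pvPartials c s := by
  intro s
  induction s with
  | nil => intro acc c _; simp [pvPartials]
  | cons x t ih =>
    intro acc c hc
    simp only [List.foldl_cons, pvPartials]
    rw [hc]
    have := ih (acc ++ [c + (x.length : Int)]) (c + (x.length : Int)) (by simp)
    simp only [Option.getD_some] at this ⊢
    rw [this, List.append_assoc]
    rfl

theorem pvPartials_getD :
    ∀ (s : List (List String)) (c : Int) (m : Nat), m < s.length →
      (pvPartials c s).getD m 0 = c + pvS s (m + 1) := by
  intro s
  induction s with
  | nil => intro c m h; simp at h
  | cons x t ih =>
    intro c m h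
    cases m with
    | zero => simp [pvPartials, pvS]
    | succ k =>
      simp only [pvPartials, List.getD_cons_succ]
      rw [ih _ k (by simpa using h)]
      unfold pvS
      simp [List.take_succ_cons]
      ring

theorem pvPrefixB_getD (s : List (List String)) {m : Nat} (h : m ≤ s.length) :
    (pvPrefixB s).getD m 0 = pvS s m := by
  unfold pvPrefixB
  rw [pvPrefixB_eq_partials s [0] 0 (by simp)]
  cases m with
  | zero => simp [pvS]
  | succ k =>
    have hk : k < s.length := by omega
    simpa using pvPartials_getD s 0 k hk

-- binary-search correctness on a table monotone below N
theorem pvBSearchB_correct (pre : List Int) (limit : Int) (N : Nat)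
    (mono : ∀ i j : Nat, i ≤ j → j < N → pre.getD (i+1) 0 ≤ pre.getD (j+1) 0) :
    ∀ d lo hi, hi - lo ≤ d → lo ≤ hi → hi ≤ N →
      lo ≤ pvBSearchB pre limit lo hi ∧ pvBSearchB pre limit lo hi ≤ hi ∧
      (∀ k, lo ≤ k → k < pvBSearchB pre limit lo hi → pre.getD (k+1) 0 ≤ limit) ∧
      (∀ k, pvBSearchB pre limit lo hi ≤ k → k < hi → ¬ pre.getD (k+1) 0 ≤ limit) := by
  intro d
  induction d with
  | zero =>
    intro lo hi hd hlh _
    have : lo = hi := by omega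
    subst this
    rw [pvBSearchB]
    simp only [lt_irrefl, dite_false]
    exact ⟨le_rfl, le_rfl, fun k h1 h2 => absurd h2 (by omega), fun k h1 h2 => absurd h2 (by omega)⟩
  | succ d ih =>
    intro lo hi hd hlh hhn
    rw [pvBSearchB]
    by_cases hlt : lo < hi
    · simp only [hlt, dif_pos]
      have hmid1 : (lo + hi) / 2 < hi := Nat.div_lt_of_lt_mul (by omega)
      have hmid2 : lo ≤ (lo + hi) / 2 := (Nat.le_div_iff_mul_le (by omega)).mpr (by omega)
      by_cases hp : pre.getD ((lo + hi) / 2 + 1) 0 ≤ limit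
      · simp only [hp, if_pos]
        obtain ⟨h1, h2, h3, h4⟩ := ih ((lo + hi) / 2 + 1) hi (by omega) (by omega) hhn
        refine ⟨by omega, h2, ?_, h4⟩
        intro k hk1 hk2
        by_cases hk3 : (lo + hi) / 2 + 1 ≤ k
        · exact h3 k hk3 hk2
        · exact le_trans (mono k ((lo + hi) / 2) (by omega) (by omega)) hp
      · simp only [hp, if_false]
        obtain ⟨h1, h2, h3, h4⟩ := ih lo ((lo + hi) / 2) (by omega) (by omega) (by omega)
        refine ⟨h1, by omega, h3, ?_⟩
        intro k hk1 hk2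
        by_cases hk3 : k < (lo + hi) / 2
        · exact h4 k hk1 hk3
        · intro hcon
          exact hp (le_trans (mono ((lo + hi) / 2) k (by omega) (by omega)) hcon)
    · simp only [hlt, dite_false]
      exact ⟨le_rfl, by omega, fun k h1 h2 => absurd h2 (by omega), fun k h1 h2 => absurd h2 (by omega)⟩

-- the two inner loops agree, given the binary-search bound r
theorem pvInner_eq (s : List (List String)) (start r : Nat)
    (_hr1 : start ≤ r) (hr2 : r ≤ s.length)
    (hin : ∀ k, start ≤ k → k < r → pvS s (k+1) ≤ pvS s start + 510)
    (hout : ∀ k, r ≤ k → k < s.length → ¬ pvS s (k+1) ≤ pvS s start + 510) :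
    ∀ d e acc out, s.length - e ≤ d → start ≤ e → e ≤ s.length →
      (acc.length : Int) = pvS s e - pvS s start →
      pvInnerA (s.drop e) acc out =
        ((List.range' e (r - e)).foldl
          (fun (st : List String × List (List String)) k =>
            let a := st.1 ++ s.getD k []
            (a, st.2 ++ [a]))
          (acc, out)).2 := by
  intro d
  induction d with
  | zero =>
    intro e acc out hd he1 he2 hlen
    have he : e = s.length := by omega
    subst he
    have hr0 : r - s.length = 0 := by omega
    rw [List.drop_length, hr0]
    simp [pvInnerA]
  | succ d ih =>
    intro e acc out hd he1 he2 hlen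
    by_cases he : e < s.length
    · rw [List.drop_eq_getElem_cons he]
      simp only [pvInnerA]
      have hc : (((acc ++ s[e]).length : Int)) = pvS s (e + 1) - pvS s start := by
        rw [pvS_succ s he]
        simp only [List.length_append]
        push_cast
        omega
      have hg : s.getD e [] = s[e] := List.getD_eq_getElem s [] he
      by_cases her : e < r
      · have hfit : pvS s (e + 1) ≤ pvS s start + 510 := hin e he1 her
        have hle : ((acc ++ s[e]).length : Int) ≤ 510 := by rw [hc]; omega
        rw [if_neg (by omega)]
        have hsplit : r - e = (r - (e + 1)) + 1 := by omega
        rw [hsplit, List.range'_succ]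
        simp only [List.foldl_cons, hg]
        exact ih (e + 1) (acc ++ s[e]) (out ++ [acc ++ s[e]]) (by omega) (by omega) (by omega) hc
      · have hbig : ¬ pvS s (e + 1) ≤ pvS s start + 510 := hout e (by omega) he
        have hgt : ((acc ++ s[e]).length : Int) > 510 := by rw [hc]; omega
        rw [if_pos (by omega)]
        have hr0 : r - e = 0 := by omega
        rw [hr0]
        simp
    · have he' : e = s.length := by omega
      subst he'
      have hr0 : r - s.length = 0 := by omega
      rw [List.drop_length, hr0]
      simp [pvInnerA]

-- the two outer loops agree
theorem pvOuter_eq (s : List (List String)) :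
    ∀ d i out, s.length - i ≤ d → i ≤ s.length →
      pvOuterA (s.drop i) out =
        (List.range' i (s.length - i)).foldl
          (fun out start =>
            pvEmitB s start
              (pvBSearchB (pvPrefixB s) ((pvPrefixB s).getD start 0 + 510) start s.length) out)
          out := by
  have hmono : ∀ i j : Nat, i ≤ j → j < s.length →
      (pvPrefixB s).getD (i+1) 0 ≤ (pvPrefixB s).getD (j+1) 0 := by
    intro i j hij hj
    rw [pvPrefixB_getD s (by omega), pvPrefixB_getD s (by omega)]
    exact pvS_mono s (by omega)
  intro d
  induction d with
  | zero =>
    intro i out hd hi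
    have : i = s.length := by omega
    subst this
    have h0 : s.length - s.length = 0 := by omega
    rw [List.drop_length, h0]
    simp [pvOuterA]
  | succ d ih =>
    intro i out hd hi
    by_cases h : i < s.length
    · rw [List.drop_eq_getElem_cons h]
      simp only [pvOuterA]
      rw [← List.drop_eq_getElem_cons h]
      have hs : s.length - i = (s.length - (i + 1)) + 1 := by omega
      rw [hs, List.range'_succ]
      simp only [List.foldl_cons]
      rw [ih (i + 1) _ (by omega) (by omega)]
      congr 1
      -- per-start equality: A's inner loop = B's binary-searched emission
      set pre := pvPrefixB s with hpre
      set limit := pre.getD i 0 + 510 with hlimit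
      set r := pvBSearchB pre limit i s.length with hrdef
      obtain ⟨h1, h2, h3, h4⟩ :=
        pvBSearchB_correct pre limit s.length hmono (s.length - i) i s.length
          (by omega) (by omega) (by omega)
      have hlim : limit = pvS s i + 510 := by
        rw [hlimit, pvPrefixB_getD s (by omega)]
      have hin : ∀ k, i ≤ k → k < r → pvS s (k + 1) ≤ pvS s i + 510 := by
        intro k hk1 hk2
        have := h3 k hk1 hk2
        rwa [pvPrefixB_getD s (by omega), hlim] at this
      have hout : ∀ k, r ≤ k → k < s.length → ¬ pvS s (k + 1) ≤ pvS s i + 510 := by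
        intro k hk1 hk2
        have := h4 k hk1 hk2
        rwa [pvPrefixB_getD s (by omega), hlim] at this
      have := pvInner_eq s i r h1 h2 hin hout (s.length - i) i [] out
        (by omega) (by omega) (by omega) (by simp)
      rw [this]
      rfl
    · have : i = s.length := by omega
      subst this
      have h0 : s.length - s.length = 0 := by omega
      rw [List.drop_length, h0]
      simp [pvOuterA]

-- ===== VERDICT (by name: the statement is the Claim_ definition above) =====
theorem compose_sentences_spec : Claim_equal_compose_sentences := by
  intro s _
  unfold Spec_compose_sentences compose_sentences compose_sentences_alt
  have h := pvOuter_eq s s.length 0 [] (by omega) (by omega)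
  rw [List.drop_zero] at h
  simp only [Nat.sub_zero] at h
  rw [h]
  simp only [List.range_eq_range']
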